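-- pv_equiv track=rewrite | github.com/zunbeeok/algorithm | 백준/골드/2212. 센서/센서.py | solution
-- ===== SOURCE A (Python) =====
-- def solution(n,k,sensors):
--     # 집중국이 센서보다 많거나 같으면 0
--     if(n <= k):
--         return 0
--
--     #거리순으로 정렬.
--     sensors.sort()
--
--     #센서간의 거리 길이 구하기.
--     distances = []
--
--     for i in range(1,len(sensors)):
--         distances.append(sensors[i]- sensors[i-1])
--
--     #센서간의 거리를 오름차순으로 정렬.
--     distances.sort()
--
--     #이렇게 접근할 생각을 못했다.
--     for i in range(k-1):
--         distances.pop()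
--
--     answer = 0
--     for distance in distances:
--         answer += distance
--     return answer
-- ===== SOURCE B (Python) =====
-- def kth_smallest(xs, j):
--     # j-th smallest value of xs (1-indexed), by quickselect with the first
--     # element as pivot: three-way partition, recurse into the one part needed.
--     p = xs[0]
--     less = [x for x in xs if x < p]
--     if j <= len(less):
--         return kth_smallest(less, j)
--     eq = sum(1 for x in xs if x == p)
--     if j <= len(less) + eq:
--         return p
--     return kth_smallest([x for x in xs if x > p], j - len(less) - eq)
--
--
-- def solution(n, k, sensors):
--     # Quickselect the threshold gap instead of sorting the gap list, then sum
--     # the kept gaps in one counting pass.  (Like A, sorts `sensors` in place.)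
--     if n <= k:
--         return 0
--     sensors.sort()
--     m = len(sensors)
--     drop = k - 1 if k > 1 else 0
--     keep = (m - 1) - drop
--     if keep <= 0:
--         return 0
--     gaps = [b - a for a, b in zip(sensors, sensors[1:])]
--     t = kth_smallest(gaps, keep)
--     below = 0
--     cnt = 0
--     for g in gaps:
--         if g < t:
--             below += g
--             cnt += 1
--     return below + t * (keep - cnt)
-- ===== Notes on version B (the rewrite author's own statement) =====
-- stated objective: alternative
-- what changed: A sorts the gap list, pops the k-1 largest one by one and sums the rest with an accumulator loop; B never sorts the gaps: it quickselects the threshold gap (recursive three-way partition on the first element) and then sums the kept gaps in a single counting pass (sum of gaps below the threshold plus the threshold times the number of kept ties).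
-- outside the precondition, e.g. on solution(3, 2, [5]): A raises IndexError, B returns 0
-- crash fix: When k < n but k > len(sensors) and k >= 2 (more pops than gaps), A raises IndexError on distances.pop(); B returns 0 (nothing is kept). — e.g. on solution(3, 2, [5]): A raises IndexError, B returns 0
import Mathlib
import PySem

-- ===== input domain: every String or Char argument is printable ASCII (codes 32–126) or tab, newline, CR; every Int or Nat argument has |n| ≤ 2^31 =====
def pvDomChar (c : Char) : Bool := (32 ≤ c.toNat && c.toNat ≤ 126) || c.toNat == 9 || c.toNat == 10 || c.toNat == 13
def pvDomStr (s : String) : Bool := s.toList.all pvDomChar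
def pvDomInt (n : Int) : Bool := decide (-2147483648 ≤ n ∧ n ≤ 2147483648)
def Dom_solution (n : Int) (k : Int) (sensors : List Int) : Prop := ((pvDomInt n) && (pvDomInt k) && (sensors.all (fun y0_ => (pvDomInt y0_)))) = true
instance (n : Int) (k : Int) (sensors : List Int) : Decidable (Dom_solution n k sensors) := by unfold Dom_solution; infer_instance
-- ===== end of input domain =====

-- B replaces A's sort-the-gaps/pop-the-largest/accumulate pipeline by a quickselect of the
-- threshold gap (three-way-partition recursion, no sort of the gap list) plus one counting pass.
-- Both A and B sort `sensors` in place in Python; the equivalence proved is about the return value.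


-- ===== PORT A =====
def solution (n : Int) (k : Int) (sensors : List Int) : Int :=
  if n ≤ k then 0
  else
    let s := PySem.List.sorted sensors (fun x => x) false
    let distances := (PySem.List.pyRange 1 (PySem.List.len s) 1).foldl
      (fun acc i => acc ++ [PySem.List.pyGetD s i 0 - PySem.List.pyGetD s (i - 1) 0]) []
    let distances := PySem.List.sorted distances (fun x => x) false
    -- for i in range(k-1): distances.pop()   (pop on [] raises in Python: Pre_ excludes it; keep acc there)
    let distances := (PySem.List.pyRange 0 (k - 1) 1).foldl
      (fun acc _ => match PySem.List.pop? acc (-1) with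
                    | some (_, rest) => rest
                    | none => acc) distances
    distances.foldl (fun answer distance => answer + distance) 0

-- ===== PORT B =====
-- helper of Source B: j-th smallest of xs (1-indexed) by quickselect, pivot = first element.
-- (Python's xs[0] raises IndexError on []; the [] arm is never reached from solution_alt.)
def kthSmallest : List Int → Int → Int
  | [], _ => 0
  | p :: rest, j =>
    let xs := p :: rest
    let less := xs.filter (fun x => x < p)
    if j ≤ (less.length : Int) then kthSmallest less j
    else
      let eqc := xs.countP (fun x => x == p)
      if j ≤ (less.length : Int) + (eqc : Int) then p
      else kthSmallest (xs.filter (fun x => p < x)) (j - less.length - eqc)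
termination_by xs _ => xs.length
decreasing_by
  · exact List.length_filter_lt_length_iff_exists.mpr ⟨p, by simp, by simp⟩
  · exact List.length_filter_lt_length_iff_exists.mpr ⟨p, by simp, by simp⟩

def solution_alt (n : Int) (k : Int) (sensors : List Int) : Int :=
  if n ≤ k then 0
  else
    let s := PySem.List.sorted sensors (fun x => x) false
    let m : Int := PySem.List.len s
    let drop : Int := if 1 < k then k - 1 else 0
    let keep : Int := (m - 1) - drop
    if keep ≤ 0 then 0
    else
      let gaps := (List.zip s (PySem.List.slice s (some 1) none)).map (fun ab => ab.2 - ab.1)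
      let t := kthSmallest gaps keep
      let bc := gaps.foldl
        (fun (st : Int × Int) g => if g < t then (st.1 + g, st.2 + 1) else st) (0, 0)
      bc.1 + t * (keep - bc.2)

-- ===== PRECONDITION & SPEC =====
-- Pre_ excludes exactly the inputs where A's pop() raises IndexError: k < n with more pops (k-1 ≥ 1)
-- than there are gaps (k > len(sensors)).
def Pre_solution (n : Int) (k : Int) (sensors : List Int) : Prop :=
  n ≤ k ∨ k ≤ (sensors.length : Int) ∨ k ≤ 1
instance (n : Int) (k : Int) (sensors : List Int) : Decidable (Pre_solution n k sensors) := by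
  unfold Pre_solution; infer_instance
def pvWitness_solution : Int × Int × List Int := (3, 2, [1, 5, 10])

-- A raises IndexError (pop from empty gap list) when k < n, len(sensors) < k and 2 ≤ k; B returns 0 there.
def Raises_solution (n : Int) (k : Int) (sensors : List Int) : Prop :=
  k < n ∧ (sensors.length : Int) < k ∧ 2 ≤ k
instance (n : Int) (k : Int) (sensors : List Int) : Decidable (Raises_solution n k sensors) := by
  unfold Raises_solution; infer_instance
def pvRaiseWitness_solution : Int × Int × List Int := (3, 2, [5])
def pvRaiseWitnessOut_solution : Int := 0

def Spec_solution (n : Int) (k : Int) (sensors : List Int) (out : Int) : Prop := out = solution_alt n k sensors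
instance (n : Int) (k : Int) (sensors : List Int) (out : Int) : Decidable (Spec_solution n k sensors out) := by unfold Spec_solution; infer_instance

-- ===== CLAIM (what is proved, stated in full; the proofs are below) =====
def Claim_equal_solution : Prop := ∀ (n : Int) (k : Int) (sensors : List Int), Dom_solution n k sensors → Pre_solution n k sensors → Spec_solution n k sensors (solution n k sensors)
def Claim_raises_solution : Prop := (∀ (n : Int) (k : Int) (sensors : List Int), Dom_solution n k sensors → Raises_solution n k sensors → ¬ Pre_solution n k sensors) ∧ (Dom_solution (pvRaiseWitness_solution.1) (pvRaiseWitness_solution.2.1) (pvRaiseWitness_solution.2.2) ∧ Raises_solution (pvRaiseWitness_solution.1) (pvRaiseWitness_solution.2.1) (pvRaiseWitness_solution.2.2) ∧ solution_alt (pvRaiseWitness_solution.1) (pvRaiseWitness_solution.2.1) (pvRaiseWitness_solution.2.2) = pvRaiseWitnessOut_solution)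

-- ===== LEMMAS AND PROOFS =====

-- A's append loop builds init ++ map f over the range.
theorem foldl_append_map {α β : Type} (r : List α) (f : α → β) (init : List β) :
    r.foldl (fun acc i => acc ++ [f i]) init = init ++ r.map f := by
  induction r generalizing init with
  | nil => simp
  | cons x t ih => simp [List.foldl_cons, ih]

-- A's gap comprehension is zipWith subtraction of consecutive elements.
theorem gaps_eq_zipWith (s : List Int) :
    (PySem.List.pyRange 1 (PySem.List.len s) 1).map
      (fun i => PySem.List.pyGetD s i 0 - PySem.List.pyGetD s (i - 1) 0)
    = List.zipWith (fun a b => a - b) s.tail s := by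
  apply List.ext_getElem
  · simp [PySem.List.length_pyRange_one, List.length_zipWith]
  · intro i h1 h2
    have hi : i < s.length - 1 := by
      simpa [PySem.List.length_pyRange_one] using h1
    have h1i : (1 : Int) + (i : Int) = ((i + 1 : Nat) : Int) := by push_cast; ring
    have h1i' : ((i + 1 : Nat) : Int) - 1 = ((i : Nat) : Int) := by push_cast; ring
    simp only [List.getElem_map, PySem.List.getElem_pyRange_one, List.getElem_zipWith,
      List.getElem_tail, h1i, h1i', PySem.List.pyGetD_natCast]
    rw [List.getD_eq_getElem s 0 (show i < s.length by omega)]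
    rw [List.getD_eq_getElem s 0 (show i + 1 < s.length by omega)]

-- B's gap comprehension (zip with the tail, then subtract) is the same zipWith.
theorem gapsB_eq_zipWith (s : List Int) :
    (List.zip s (PySem.List.slice s (some 1) none)).map (fun ab => ab.2 - ab.1)
    = List.zipWith (fun a b => a - b) s.tail s := by
  rw [PySem.List.slice_from_one, List.zip, List.map_zipWith]
  rw [List.zipWith_comm]

-- The pop loop removes the last element m times.
theorem pop_loop_eq_take (m : Nat) (l : List Int) (hm : m ≤ l.length) :
    (PySem.List.pyRange 0 (m : Int) 1).foldl
      (fun acc _ => match PySem.List.pop? acc (-1) with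
                    | some (_, rest) => rest
                    | none => acc) l = l.take (l.length - m) := by
  induction m with
  | zero =>
      rw [PySem.List.pyRange_one_eq_nil (by omega)]
      simp
  | succ m ih =>
      have h0 : ((m + 1 : Nat) : Int) = (m : Int) + 1 := by push_cast; ring
      rw [h0, PySem.List.pyRange_one_succ_right (by positivity), List.foldl_append,
        ih (by omega)]
      have hne : l.take (l.length - m) ≠ [] := by
        simp only [ne_eq, List.take_eq_nil_iff]
        intro h
        rcases h with h | h
        · omega
        · rw [h] at hm; simp at hm
      simp only [List.foldl_cons, List.foldl_nil]
      rw [← List.dropLast_append_getLast hne, PySem.List.pop?_last]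
      rw [List.dropLast_eq_take, List.length_take, List.take_take]
      have hmin : min (min (l.length - m) l.length - 1) (l.length - m) = l.length - (m + 1) := by
        omega
      rw [hmin]

-- foldl (+) 0 is List.sum.
theorem sumfold (l : List Int) :
    List.foldl (fun a x => a + x) 0 l = l.sum := by
  rw [PySem.List.foldl_add l (fun y => y) 0]
  simp

-- A's whole else-branch is the sum of the (len - (k-1)) smallest gaps.
theorem A_take (k : Int) (g : List Int) (hk : (k - 1).toNat ≤ g.length) :
    ((PySem.List.pyRange 0 (k - 1) 1).foldl
        (fun acc _ => match PySem.List.pop? acc (-1) with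
                      | some (_, rest) => rest
                      | none => acc)
        (PySem.List.sorted g (fun x => x) false)).foldl
      (fun answer distance => answer + distance) 0
    = ((PySem.List.sorted g (fun x => x) false).take
        ((PySem.List.sorted g (fun x => x) false).length - (k - 1).toNat)).sum := by
  have hrange : PySem.List.pyRange 0 (k - 1) 1
      = PySem.List.pyRange 0 (((k - 1).toNat : Nat) : Int) 1 := by
    by_cases hk1 : 1 ≤ k
    · congr 1; omega
    · rw [PySem.List.pyRange_one_eq_nil (by omega), PySem.List.pyRange_one_eq_nil (by omega)]
  rw [hrange, pop_loop_eq_take _ _ (by rw [PySem.List.length_sorted]; exact hk), sumfold]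

-- B's counting pass returns (sum of the gaps below t, their count).
theorem foldl_count_pair (g : List Int) (t : Int) (a b : Int) :
    g.foldl (fun (st : Int × Int) x => if x < t then (st.1 + x, st.2 + 1) else st) (a, b)
    = (a + (g.filter (fun x => x < t)).sum, b + (g.countP (fun x => x < t) : Int)) := by
  induction g generalizing a b with
  | nil => simp
  | cons x l ih =>
      by_cases hx : x < t
      · simp only [List.foldl_cons, if_pos hx, ih, List.filter_cons, List.countP_cons, hx,
          decide_true, if_true, List.sum_cons, Prod.mk.injEq]
        constructor
        · ring
        · push_cast; ring
      · simp only [List.foldl_cons, if_neg hx, ih, List.filter_cons, List.countP_cons, hx,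
          decide_false, if_false]
        simp


theorem filter_lt_sorted (d : List Int) (t : Int) (hd : d.Pairwise (· ≤ ·)) :
    d.filter (fun x => x < t) = d.take (d.countP (fun x => x < t)) := by
  induction d with
  | nil => simp
  | cons a l ih =>
      rcases List.pairwise_cons.mp hd with ⟨ha, hl⟩
      by_cases h : a < t
      · simp only [List.filter_cons, List.countP_cons, h, decide_true, if_true]
        rw [ih hl]
        rfl
      · have hnone : ∀ b ∈ l, ¬ (b < t) := fun b hb hbt => h (lt_of_le_of_lt (ha b hb) hbt)
        have hf : l.filter (fun x => x < t) = [] := by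
          rw [List.filter_eq_nil_iff]; intro b hb; simpa using hnone b hb
        have hc : l.countP (fun x => x < t) = 0 := by
          rw [List.countP_eq_zero]; intro b hb; simpa using hnone b hb
        simp [List.countP_cons, h, hf, hc]

theorem drop_ge_sorted (d : List Int) (t : Int) (hd : d.Pairwise (· ≤ ·)) :
    ∀ x ∈ d.drop (d.countP (fun x => x < t)), t ≤ x := by
  induction d with
  | nil => simp
  | cons a l ih =>
      rcases List.pairwise_cons.mp hd with ⟨ha, hl⟩
      by_cases h : a < t
      · have hcnt : (a :: l).countP (fun x => x < t) = l.countP (fun x => x < t) + 1 := by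
          simp [List.countP_cons, h]
        rw [hcnt, List.drop_succ_cons]
        exact ih hl
      · have hc : l.countP (fun x => x < t) = 0 := by
          rw [List.countP_eq_zero]
          intro b hb
          simp only [decide_eq_true_eq]
          exact fun hbt => h (lt_of_le_of_lt (ha b hb) hbt)
        have hcnt : (a :: l).countP (fun x => x < t) = 0 := by
          simp [List.countP_cons, h, hc]
        rw [hcnt, List.drop_zero]
        intro x hx
        rcases List.mem_cons.mp hx with rfl | hx
        · omega
        · exact le_trans (le_of_not_gt h) (ha x hx)

theorem sorted_partition (p : Int) (g : List Int) :
    PySem.List.sorted g (fun x => x) false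
    = PySem.List.sorted (g.filter (fun x => decide (x < p))) (fun x => x) false
      ++ g.filter (fun x => x == p)
      ++ PySem.List.sorted (g.filter (fun x => decide (p < x))) (fun x => x) false := by
  set L := g.filter (fun x => decide (x < p)) with hL
  set E := g.filter (fun x => x == p) with hE
  set Gt := g.filter (fun x => decide (p < x)) with hGt
  set SL := PySem.List.sorted L (fun x => x) false with hSL
  set SG := PySem.List.sorted Gt (fun x => x) false with hSG
  have e1 : (g.filter (fun x => !decide (x < p))).filter (fun x => x == p) = E := by
    rw [List.filter_filter]
    apply List.filter_congr
    intro x _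
    by_cases hx : x = p <;> simp [hx]
  have e2 : (g.filter (fun x => !decide (x < p))).filter (fun x => !(x == p)) = Gt := by
    rw [List.filter_filter]
    apply List.filter_congr
    intro x _
    by_cases hx : x = p
    · simp [hx]
    · by_cases h2 : x < p
      · simp [h2]
        omega
      · simp [hx, h2, show p < x by omega]
  have hperm : (SL ++ E ++ SG).Perm g := by
    have p1 : (SL ++ E ++ SG).Perm (L ++ (E ++ Gt)) := by
      rw [List.append_assoc]
      exact (PySem.List.sorted_perm L (fun x => x) false).append
        ((List.Perm.refl E).append (PySem.List.sorted_perm Gt (fun x => x) false))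
    have p2 : (E ++ Gt).Perm (g.filter (fun x => !decide (x < p))) := by
      rw [← e1, ← e2]
      exact List.filter_append_perm _ _
    exact p1.trans (((List.Perm.refl L).append p2).trans (List.filter_append_perm _ g))
  have hEp : ∀ x ∈ E, x = p := by
    intro x hx
    have := List.of_mem_filter hx
    simpa using this
  have hpw : (SL ++ E ++ SG).Pairwise (· ≤ ·) := by
    rw [List.pairwise_append, List.pairwise_append]
    refine ⟨⟨by simpa using PySem.List.sorted_pairwise L (fun x => x), ?_, ?_⟩,
      by simpa using PySem.List.sorted_pairwise Gt (fun x => x), ?_⟩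
    · rw [List.eq_replicate_of_mem hEp]
      simp [List.pairwise_replicate]
    · intro a ha b hb
      have ha' : a < p := by simpa using List.of_mem_filter ((PySem.List.mem_sorted _ _ _ _).mp ha)
      rw [hEp b hb]; omega
    · intro a ha b hb
      have hb' : p < b := by simpa using List.of_mem_filter ((PySem.List.mem_sorted _ _ _ _).mp hb)
      rcases List.mem_append.mp ha with ha | ha
      · have ha' : a < p := by simpa using List.of_mem_filter ((PySem.List.mem_sorted _ _ _ _).mp ha)
        omega
      · rw [hEp a ha]; omega
  exact PySem.List.sorted_id_eq_of_perm_of_pairwise g _ hperm hpw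

theorem kth_correct : ∀ (N : Nat) (g : List Int), g.length ≤ N → ∀ j : Nat, 1 ≤ j → j ≤ g.length →
    kthSmallest g (j : Int) = (PySem.List.sorted g (fun x => x) false).getD (j - 1) 0 := by
  intro N
  induction N with
  | zero => intro g hg j h1 h2; omega
  | succ N ih =>
    intro g hg j h1 h2
    cases g with
    | nil => simp at h2; omega
    | cons p rest =>
      rw [sorted_partition p (p :: rest)]
      set L := (p :: rest).filter (fun x => decide (x < p)) with hL
      set E := (p :: rest).filter (fun x => x == p) with hE
      set Gt := (p :: rest).filter (fun x => decide (p < x)) with hGt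
      set SL := PySem.List.sorted L (fun x => x) false with hSL
      set SG := PySem.List.sorted Gt (fun x => x) false with hSG
      have hSLlen : SL.length = L.length := PySem.List.length_sorted _ _ _
      have hSGlen : SG.length = Gt.length := PySem.List.length_sorted _ _ _
      have hLlt : L.length < (p :: rest).length :=
        List.length_filter_lt_length_iff_exists.mpr ⟨p, by simp, by simp⟩
      have hGtlt : Gt.length < (p :: rest).length :=
        List.length_filter_lt_length_iff_exists.mpr ⟨p, by simp, by simp⟩
      have hcount : (p :: rest).countP (fun x => x == p) = E.length := by
        rw [hE, List.countP_eq_length_filter]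
      have htot : L.length + E.length + Gt.length = (p :: rest).length := by
        have h := PySem.List.length_sorted (p :: rest) (fun x : Int => x) false
        rw [sorted_partition p (p :: rest)] at h
        simp only [List.length_append, ← hL, ← hE, ← hGt, ← hSL, ← hSG] at h
        omega
      have hEp : ∀ x ∈ E, x = p := by
        intro x hx
        have := List.of_mem_filter hx
        simpa using this
      rw [kthSmallest]
      simp only [← hL, ← hE, ← hGt, hcount]
      split_ifs with hb1 hb2
      · -- j ≤ |L|
        have hjL : j ≤ L.length := by exact_mod_cast hb1
        rw [List.append_assoc, List.getD_append _ _ _ _ (by omega)]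
        exact ih L (by simp at hLlt hg ⊢; omega) j h1 hjL
      · -- |L| < j ≤ |L| + |E|
        have hjL : L.length < j := by omega
        have hjE : j ≤ L.length + E.length := by omega
        rw [List.getD_append _ _ _ _ (show j - 1 < (SL ++ E).length by
          simp only [List.length_append, hSLlen]; omega)]
        rw [List.getD_append_right _ _ _ _ (show SL.length ≤ j - 1 by omega)]
        have hidx : j - 1 - SL.length < E.length := by omega
        rw [List.getD_eq_getElem _ _ hidx]
        exact (hEp _ (List.getElem_mem _)).symm
      · -- recurse on Gt
        have hjLE : L.length + E.length < j := by omega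
        have hc : (j : Int) - (L.length : Int) - (E.length : Int)
            = ((j - L.length - E.length : Nat) : Int) := by omega
        rw [hc]
        rw [List.getD_append_right _ _ _ _ (show (SL ++ E).length ≤ j - 1 by
          simp only [List.length_append, hSLlen]; omega)]
        have hidx : j - 1 - (SL ++ E).length = (j - L.length - E.length) - 1 := by
          simp only [List.length_append, hSLlen]; omega
        rw [hidx]
        exact ih Gt (by simp at hGtlt hg ⊢; omega) _ (by omega)
          (by simp only [List.length_cons] at h2 htot; omega)

theorem take_sum_sorted (d : List Int) (hd : d.Pairwise (· ≤ ·)) (j : Nat)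
    (h1 : 1 ≤ j) (h2 : j ≤ d.length) :
    (d.take j).sum
      = (d.filter (fun x => x < d.getD (j - 1) 0)).sum
        + d.getD (j - 1) 0 * ((j : Int) - d.countP (fun x => x < d.getD (j - 1) 0)) := by
  have hj1 : j - 1 < d.length := by omega
  set t := d.getD (j - 1) 0 with ht
  have htg : t = d[j - 1] := List.getD_eq_getElem d 0 hj1
  set c := d.countP (fun x => x < t) with hc
  have hcle : c ≤ d.length := List.countP_le_length
  have hfil := filter_lt_sorted d t hd
  have hmono : ∀ (p q : Nat) (hp : p < d.length) (hq : q < d.length), p ≤ q → d[p] ≤ d[q] := by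
    intro p q hp hq hpq
    rcases Nat.lt_or_ge p q with h | h
    · exact (List.pairwise_iff_getElem.mp hd) p q hp hq h
    · have : p = q := by omega
      subst this; exact le_refl _
  have hcj : c < j := by
    by_contra hcon
    push_neg at hcon
    have hmem : d[j - 1] ∈ d.take c := by
      refine List.mem_iff_getElem.mpr ⟨j - 1, by rw [List.length_take]; omega, ?_⟩
      exact List.getElem_take
    rw [← hfil] at hmem
    have := List.of_mem_filter hmem
    rw [← htg] at this
    simp at this
  have hmidlen : ((d.drop c).take (j - c)).length = j - c := by
    rw [List.length_take, List.length_drop]; omega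
  have hmid : (d.drop c).take (j - c) = List.replicate (j - c) t := by
    have hmem : ∀ x ∈ (d.drop c).take (j - c), x = t := by
      intro x hx
      obtain ⟨i, hi, hxi⟩ := List.mem_iff_getElem.mp hx
      have hi' : i < j - c := by rw [hmidlen] at hi; exact hi
      have hdrop : i < (d.drop c).length := by rw [List.length_drop]; omega
      have hx1 : x = d[c + i]'(by omega) := by
        rw [← hxi, List.getElem_take, List.getElem_drop]
      have hle : x ≤ t := by
        rw [hx1, htg]
        exact hmono (c + i) (j - 1) (by omega) (by omega) (by omega)
      have hge : t ≤ x := by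
        apply drop_ge_sorted d t hd
        exact List.mem_of_mem_take (by rw [← hxi]; exact List.getElem_mem _)
      omega
    have h := List.eq_replicate_of_mem hmem
    rw [hmidlen] at h
    exact h
  have hsplit : d.take j = d.take c ++ (d.drop c).take (j - c) := by
    conv_lhs => rw [show j = c + (j - c) from by omega]
    exact List.take_add
  rw [hsplit, List.sum_append, hmid, hfil, List.sum_replicate, nsmul_eq_mul]
  have hcast : ((j - c : Nat) : Int) = (j : Int) - (c : Int) := by omega
  rw [hcast]; ring

-- ===== VERDICT (by name: the statement is the Claim_ definition above) =====
theorem solution_spec : Claim_equal_solution := by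
  intro n k sensors _ hpre
  unfold Spec_solution
  by_cases hnk : n ≤ k
  · simp [solution, solution_alt, hnk]
  simp only [solution, solution_alt, if_neg hnk]
  rw [foldl_append_map, List.nil_append, gaps_eq_zipWith, gapsB_eq_zipWith,
    PySem.List.len_eq]
  set s := PySem.List.sorted sensors (fun x => x) false with hs
  have hslen : s.length = sensors.length := PySem.List.length_sorted _ _ _
  set G := List.zipWith (fun a b => a - b) s.tail s with hGdef
  have hGlen : G.length = s.length - 1 := by
    rw [hGdef, List.length_zipWith, List.length_tail]
    omega
  set d := PySem.List.sorted G (fun x => x) false with hd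
  have hdlen : d.length = G.length := PySem.List.length_sorted _ _ _
  have hpre' : k ≤ (sensors.length : Int) ∨ k ≤ 1 := by
    rcases hpre with h | h | h
    · exact absurd h hnk
    · exact Or.inl h
    · exact Or.inr h
  have hkA : (k - 1).toNat ≤ G.length := by omega
  rw [A_take k G hkA]
  have hdrop : (if 1 < k then k - 1 else 0 : Int) = (((k - 1).toNat : Nat) : Int) := by
    split_ifs <;> omega
  rw [hdrop]
  by_cases hkeep : (s.length : Int) - 1 - (((k - 1).toNat : Nat) : Int) ≤ 0
  · rw [if_pos hkeep]
    have h0 : d.length - (k - 1).toNat = 0 := by omega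
    rw [h0, List.take_zero, List.sum_nil]
  · rw [if_neg hkeep]
    set j := d.length - (k - 1).toNat with hj
    have hj1 : 1 ≤ j := by omega
    have hj2 : j ≤ d.length := by omega
    have hjint : ((j : Nat) : Int) = (s.length : Int) - 1 - (((k - 1).toNat : Nat) : Int) := by
      omega
    rw [← hjint, kth_correct G.length G le_rfl j hj1 (by omega), foldl_count_pair]
    have hperm : d.Perm G := PySem.List.sorted_perm _ _ _
    have hdpw : d.Pairwise (· ≤ ·) := by
      simpa using PySem.List.sorted_pairwise G (fun x => x)
    rw [← (hperm.filter _).sum_eq, ← hperm.countP_eq,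
      take_sum_sorted d hdpw j hj1 hj2]
    ring

@[simp]
theorem solution_raises : Claim_raises_solution := by
  unfold Claim_raises_solution
  constructor
  · intro n k sensors _ hr hp
    rcases hr with ⟨h1, h2, h3⟩
    rcases hp with h | h | h <;> omega
  · refine ⟨by decide, by decide, by decide⟩
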